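-- pv_equiv track=rewrite | github.com/backspring-labs/squad-ops | _v0_legacy/agents/capabilities/prd_processor.py | _parse_sections
-- ===== SOURCE A (Python) =====
-- def _parse_sections(content: str) -> dict[str, str]:
--     """
--     Parse PRD content into sections.
--
--     Basic implementation - can be enhanced with more sophisticated parsing.
--     """
--     sections = {}
--
--     # Simple section parsing (look for markdown headers)
--     lines = content.split('\n')
--     current_section = None
--     current_content = []
--
--     for line in lines:
--         if line.startswith('#'):
--             # Save previous section
--             if current_section:
--                 sections[current_section] = '\n'.join(current_content).strip()
--
--             # Start new section
--             current_section = line.lstrip('#').strip()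
--             current_content = []
--         else:
--             if current_section:
--                 current_content.append(line)
--
--     # Save last section
--     if current_section:
--         sections[current_section] = '\n'.join(current_content).strip()
--
--     return sections
-- ===== SOURCE B (Python) =====
-- def _scan(lines, n, j):
--     # advance j to the index of the next header line (or to n)
--     while j < n and not lines[j].startswith('#'):
--         j += 1
--     return j
--
--
-- def _parse_sections(content: str) -> dict[str, str]:
--     """Find header-line boundaries first, then emit each chunk between
--     consecutive headers; a header whose stripped title is empty is skipped
--     (its chunk is discarded), and text before the first header is dropped."""
--     lines = content.split('\n')
--     n = len(lines)
--     sections = {}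
--     i = _scan(lines, n, 0)  # drop anything before the first header
--     while i < n:
--         key = lines[i].lstrip('#').strip()
--         j = _scan(lines, n, i + 1)
--         if key:
--             sections[key] = '\n'.join(lines[i + 1:j]).strip()
--         i = j
--     return sections
-- ===== Notes on version B (the rewrite author's own statement) =====
-- stated objective: alternative
-- what changed: Replaces A's per-line accumulator state machine (current_section/current_content carried through one fold) by a boundary scan: a helper locates the next header index, and the main loop processes each header-to-header chunk with a single slice-and-join, letting empty-titled headers simply discard their chunk.
import Mathlib
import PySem

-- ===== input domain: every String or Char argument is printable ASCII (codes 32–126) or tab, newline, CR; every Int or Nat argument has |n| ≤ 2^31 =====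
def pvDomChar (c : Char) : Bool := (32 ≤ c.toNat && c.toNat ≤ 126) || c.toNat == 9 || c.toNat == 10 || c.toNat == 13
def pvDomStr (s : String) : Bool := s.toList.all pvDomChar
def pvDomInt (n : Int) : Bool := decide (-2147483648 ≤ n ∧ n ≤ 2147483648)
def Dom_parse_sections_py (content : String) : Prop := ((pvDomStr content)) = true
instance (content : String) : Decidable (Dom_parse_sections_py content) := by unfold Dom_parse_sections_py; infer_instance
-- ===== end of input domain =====

-- B re-implements A's per-line accumulator state machine as a boundary scan
-- (find the next header index, then slice-and-join each chunk); same results.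

-- shared primitives (both Pythons use the same expressions on a line)
-- line.lstrip('#') : drop the leading run of '#' characters (exact for a one-char strip set)
def lstripHash (s : String) : String := String.ofList (s.toList.dropWhile (fun c => c == '#'))

-- line.lstrip('#').strip()
def sectionKey (line : String) : String := PySem.Str.strip (lstripHash line)

-- ===== PORT A =====
-- Python truthiness of `current_section` (None or a str): falsy iff None or ""
def csTruthy (cs : Option String) : Bool :=
  match cs with
  | none => false
  | some s => !(s == "")

-- the "save previous/last section" statement of A
def flushA (st : PySem.Dict String String × Option String × List String) :
    PySem.Dict String String :=
  let (sections, cs, cc) := st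
  if csTruthy cs then sections.insert (cs.getD "") (PySem.Str.strip (PySem.Str.join "\n" cc))
  else sections

-- body of A's `for line in lines` loop
def stepA (st : PySem.Dict String String × Option String × List String) (line : String) :
    PySem.Dict String String × Option String × List String :=
  if PySem.Str.startswith line "#" then
    (flushA st, some (sectionKey line), [])
  else
    let (sections, cs, cc) := st
    if csTruthy cs then (sections, cs, cc ++ [line]) else (sections, cs, cc)

def parse_sections_py (content : String) : List (String × String) :=
  -- lines = content.split('\n'); sep ≠ "", so split? is always `some`
  (flushA ((((PySem.Str.split? content "\n").getD []).foldl stepA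
    (PySem.Dict.empty, none, [])))).items

-- ===== PORT B =====
-- _scan(lines, n, j): while j < n and not lines[j].startswith('#'): j += 1
def bScan (lines : List String) (n j : Nat) : Nat :=
  if h : j < n ∧ PySem.Str.startswith (lines.getD j "") "#" = false then
    bScan lines n (j + 1)
  else j
termination_by n - j
decreasing_by omega

theorem bScan_ge (lines : List String) (n j : Nat) : j ≤ bScan lines n j := by
  fun_induction bScan with
  | case1 j h ih => omega
  | case2 j h => omega

-- the `while i < n:` loop of B
def bLoop (lines : List String) (n i : Nat) (sections : PySem.Dict String String) :
    PySem.Dict String String :=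
  if h : i < n then
    let key := sectionKey (lines.getD i "")
    let j := bScan lines n (i + 1)
    let sections' :=
      if key ≠ "" then
        sections.insert key
          (PySem.Str.strip (PySem.Str.join "\n"
            (PySem.List.slice lines (some ((i + 1 : Nat) : Int)) (some ((j : Nat) : Int)))))
      else sections
    bLoop lines n j sections'
  else sections
termination_by n - i
decreasing_by
  have := bScan_ge lines n (i + 1)
  omega

def parse_sections_py_alt (content : String) : List (String × String) :=
  -- lines = content.split('\n') (sep ≠ "", split? always `some`); n = len(lines)
  (bLoop ((PySem.Str.split? content "\n").getD [])
    ((PySem.Str.split? content "\n").getD []).length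
    (bScan ((PySem.Str.split? content "\n").getD [])
      ((PySem.Str.split? content "\n").getD []).length 0)
    PySem.Dict.empty).items

-- ===== PRECONDITION & SPEC =====
def Spec_parse_sections_py (content : String) (out : List (String × String)) : Prop := out = parse_sections_py_alt content
instance (content : String) (out : List (String × String)) : Decidable (Spec_parse_sections_py content out) := by unfold Spec_parse_sections_py; infer_instance

-- ===== CLAIM (what is proved, stated in full; the proofs are below) =====
def Claim_equal_parse_sections_py : Prop := ∀ (content : String), Dom_parse_sections_py content → Spec_parse_sections_py content (parse_sections_py content)

-- ===== LEMMAS AND PROOFS =====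

theorem bScan_step (lines : List String) (n j : Nat) (hj : j < n)
    (hh : PySem.Str.startswith (lines.getD j "") "#" = false) :
    bScan lines n j = bScan lines n (j + 1) := by
  rw [bScan, dif_pos ⟨hj, hh⟩]

theorem bScan_stop (lines : List String) (n j : Nat)
    (hh : ¬(j < n ∧ PySem.Str.startswith (lines.getD j "") "#" = false)) :
    bScan lines n j = j := by
  rw [bScan]; simp only [dif_neg hh]

theorem bLoop_stop (lines : List String) (n i : Nat) (hi : ¬ i < n)
    (d : PySem.Dict String String) : bLoop lines n i d = d := by
  rw [bLoop]; simp only [dif_neg hi]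

-- one unfolding of bLoop at a header position
theorem bLoop_step (lines : List String) (n i : Nat) (hi : i < n)
    (d : PySem.Dict String String) :
    bLoop lines n i d =
      bLoop lines n (bScan lines n (i + 1))
        (if sectionKey (lines.getD i "") ≠ "" then
          d.insert (sectionKey (lines.getD i ""))
            (PySem.Str.strip (PySem.Str.join "\n"
              (PySem.List.slice lines (some ((i + 1 : Nat) : Int))
                (some ((bScan lines n (i + 1) : Nat) : Int)))))
        else d) := by
  conv_lhs => rw [bLoop]
  simp only [dif_pos hi]

-- lines[i:j] as drop/take, and its head/tail decomposition
theorem slice_nat (lines : List String) (a b : Nat) :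
    PySem.List.slice lines (some ((a : Nat) : Int)) (some ((b : Nat) : Int)) =
      (lines.drop a).take (b - a) := PySem.List.slice_natCast lines a b

theorem slice_cons (lines : List String) (i j : Nat) (hij : i < j) (hin : i < lines.length) :
    (lines.drop i).take (j - i) = lines[i] :: (lines.drop (i + 1)).take (j - (i + 1)) := by
  rw [List.drop_eq_getElem_cons hin]
  have : j - i = (j - (i + 1)) + 1 := by omega
  rw [this, List.take_succ_cons]

theorem getD_at (lines : List String) (i : Nat) (hin : i < lines.length) :
    lines.getD i "" = lines[i] := List.getD_eq_getElem lines "" hin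

-- The invariant, for the two shapes of A's loop state: falsy current_section
-- (Inv1) and a non-empty current_section with accumulated content (Inv2).
def Inv1 (lines : List String) (i : Nat) : Prop :=
  ∀ (d : PySem.Dict String String) (cs : Option String) (cc : List String),
    csTruthy cs = false →
    flushA ((lines.drop i).foldl stepA (d, cs, cc)) =
      bLoop lines lines.length (bScan lines lines.length i) d

def Inv2 (lines : List String) (i : Nat) : Prop :=
  ∀ (d : PySem.Dict String String) (k : String) (cc : List String),
    k ≠ "" →
    flushA ((lines.drop i).foldl stepA (d, some k, cc)) =
      bLoop lines lines.length (bScan lines lines.length i)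
        (d.insert k (PySem.Str.strip (PySem.Str.join "\n"
          (cc ++ (lines.drop i).take (bScan lines lines.length i - i)))))

-- base case: the suffix is empty (i = length): A flushes, B's loop stops
theorem main_base (lines : List String) (i : Nat) (hge : lines.length ≤ i) :
    Inv1 lines i ∧ Inv2 lines i := by
  have hdrop : lines.drop i = [] := List.drop_eq_nil_of_le hge
  have hscan : bScan lines lines.length i = i := bScan_stop lines lines.length i (by omega)
  have hstop : ∀ d, bLoop lines lines.length i d = d :=
    fun d => bLoop_stop lines lines.length i (by omega) d
  constructor
  · intro d cs cc hcs
    rw [hdrop, hscan, hstop]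
    simp [List.foldl_nil, flushA, hcs]
  · intro d k cc hk
    rw [hdrop, hscan, hstop]
    simp [List.foldl_nil, flushA, csTruthy, hk]

-- inductive step on the length of the remaining suffix
theorem main_aux (lines : List String) :
    ∀ (m i : Nat), lines.length - i ≤ m → i ≤ lines.length →
      Inv1 lines i ∧ Inv2 lines i := by
  intro m
  induction m with
  | zero => intro i hm hi; exact main_base lines i (by omega)
  | succ m IHm =>
    intro i hm hi
    by_cases hend : i < lines.length
    · have hdrop : lines.drop i = lines[i] :: lines.drop (i + 1) :=
        List.drop_eq_getElem_cons hend
      have hget : lines.getD i "" = lines[i] := getD_at lines i hend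
      have hIH : Inv1 lines (i + 1) ∧ Inv2 lines (i + 1) := IHm (i + 1) (by omega) (by omega)
      by_cases hh : PySem.Str.startswith lines[i] "#" = true
      · -- header line at i
        have hhc : PySem.Chars.startswith lines[i].toList ['#'] = true := by simpa using hh
        have hscan : bScan lines lines.length i = i :=
          bScan_stop lines lines.length i (by rw [hget]; simp [hhc])
        constructor
        · intro d cs cc hcs
          rw [hdrop, List.foldl_cons]
          have hstep : stepA (d, cs, cc) lines[i]
              = (flushA (d, cs, cc), some (sectionKey lines[i]), []) := by
            simp [stepA, hhc]
          have hflush : flushA (d, cs, cc) = d := by simp [flushA, hcs]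
          rw [hstep, hflush, hscan, bLoop_step lines lines.length i hend d, hget]
          by_cases hk : sectionKey lines[i] = ""
          · rw [if_neg (by simp [hk])]
            exact hIH.1 d (some (sectionKey lines[i])) [] (by simp [csTruthy, hk])
          · rw [if_pos hk]
            have := hIH.2 d (sectionKey lines[i]) [] hk
            rw [this, slice_nat]
            simp
        · intro d k cc hk
          rw [hscan]
          rw [Nat.sub_self, List.take_zero, List.append_nil]
          rw [hdrop, List.foldl_cons]
          have hstep : stepA (d, some k, cc) lines[i]
              = (flushA (d, some k, cc), some (sectionKey lines[i]), []) := by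
            simp [stepA, hhc]
          have hflush : flushA (d, some k, cc)
              = d.insert k (PySem.Str.strip (PySem.Str.join "\n" cc)) := by
            simp [flushA, csTruthy, hk]
          rw [hstep, hflush]
          rw [bLoop_step lines lines.length i hend _, hget]
          by_cases hk2 : sectionKey lines[i] = ""
          · rw [if_neg (by simp [hk2])]
            exact hIH.1 _ (some (sectionKey lines[i])) [] (by simp [csTruthy, hk2])
          · rw [if_pos hk2]
            have := hIH.2 (d.insert k (PySem.Str.strip (PySem.Str.join "\n" cc)))
              (sectionKey lines[i]) [] hk2
            rw [this, slice_nat]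
            simp
      · -- non-header line at i
        have hh' : PySem.Str.startswith lines[i] "#" = false := by
          simpa using hh
        have hhc : PySem.Chars.startswith lines[i].toList ['#'] = false := by simpa using hh'
        have hscan : bScan lines lines.length i = bScan lines lines.length (i + 1) :=
          bScan_step lines lines.length i hend (by rw [hget]; exact hh')
        constructor
        · intro d cs cc hcs
          rw [hdrop, List.foldl_cons]
          have hstep : stepA (d, cs, cc) lines[i] = (d, cs, cc) := by
            cases cs with
            | none => simp [stepA, hhc, csTruthy]
            | some s =>
              have : (!(s == "")) = false := by simpa [csTruthy] using hcs
              simp [stepA, hhc, csTruthy, this]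
          rw [hstep, hscan]
          exact hIH.1 d cs cc hcs
        · intro d k cc hk
          have hj1 : i + 1 ≤ bScan lines lines.length (i + 1) :=
            bScan_ge lines lines.length (i + 1)
          have hsl : (lines.drop i).take (bScan lines lines.length (i + 1) - i)
              = lines[i] :: (lines.drop (i + 1)).take (bScan lines lines.length (i + 1) - (i + 1)) :=
            slice_cons lines i (bScan lines lines.length (i + 1)) (by omega) hend
          rw [hscan, hsl]
          rw [hdrop, List.foldl_cons]
          have hstep : stepA (d, some k, cc) lines[i] = (d, some k, cc ++ [lines[i]]) := by
            simp [stepA, hhc, csTruthy, hk]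
          rw [hstep]
          have := hIH.2 d k (cc ++ [lines[i]]) hk
          rw [this]
          simp
    · exact main_base lines i (by omega)

-- ===== VERDICT (by name: the statement is the Claim_ definition above) =====
theorem parse_sections_py_spec : Claim_equal_parse_sections_py := by
  intro content _
  unfold Spec_parse_sections_py parse_sections_py parse_sections_py_alt
  have h := (main_aux ((PySem.Str.split? content "\n").getD [])
      ((PySem.Str.split? content "\n").getD []).length 0 (by omega) (by omega)).1
      PySem.Dict.empty none [] rfl
  simp only [List.drop_zero] at h
  rw [h]
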